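-- pv_equiv track=rewrite | github.com/hallucinate-llc/HACC | research_data/scripts/extract_quantum_residential_documents.py | _unescape_common_backslash_u_sequences
-- ===== SOURCE A (Python) =====
-- def _unescape_common_backslash_u_sequences(s: str) -> str:
--     """Best-effort unescape for strings containing literal \\uXXXX sequences."""
--
--     if "\\u" not in s:
--         return s
--
--     replacements = {
--         "\\u0026": "&",
--         "\\u003d": "=",
--         "\\u003f": "?",
--         "\\u002f": "/",
--         "\\u003a": ":",
--         "\\u0025": "%",
--         "\\u0023": "#",
--         "\\u0020": " ",
--         "\\u0022": '"',
--     }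
--     for k, v in replacements.items():
--         s = s.replace(k, v).replace(k.upper(), v)
--     return s
-- ===== SOURCE B (Python) =====
-- def _unescape_common_backslash_u_sequences(s: str) -> str:
--     """Single left-to-right scan with a lookup table instead of 18 replace passes."""
--
--     if "\\u" not in s:
--         return s
--
--     table = {}
--     for k, v in {
--         "\\u0026": "&",
--         "\\u003d": "=",
--         "\\u003f": "?",
--         "\\u002f": "/",
--         "\\u003a": ":",
--         "\\u0025": "%",
--         "\\u0023": "#",
--         "\\u0020": " ",
--         "\\u0022": '"',
--     }.items():
--         table[k] = v
--         table[k.upper()] = v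
--
--     out = []
--     i = 0
--     n = len(s)
--     while i < n:
--         if s[i] == "\\":
--             rep = table.get(s[i:i + 6])
--             if rep is not None:
--                 out.append(rep)
--                 i += 6
--                 continue
--         out.append(s[i])
--         i += 1
--     return "".join(out)
-- ===== Notes on version B (the rewrite author's own statement) =====
-- stated objective: alternative
-- what changed: Replaces A's 18 sequential full-string replace() passes by one left-to-right scan that looks each 6-character window starting at a backslash up in a table of all 18 literal key forms.
import Mathlib
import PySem

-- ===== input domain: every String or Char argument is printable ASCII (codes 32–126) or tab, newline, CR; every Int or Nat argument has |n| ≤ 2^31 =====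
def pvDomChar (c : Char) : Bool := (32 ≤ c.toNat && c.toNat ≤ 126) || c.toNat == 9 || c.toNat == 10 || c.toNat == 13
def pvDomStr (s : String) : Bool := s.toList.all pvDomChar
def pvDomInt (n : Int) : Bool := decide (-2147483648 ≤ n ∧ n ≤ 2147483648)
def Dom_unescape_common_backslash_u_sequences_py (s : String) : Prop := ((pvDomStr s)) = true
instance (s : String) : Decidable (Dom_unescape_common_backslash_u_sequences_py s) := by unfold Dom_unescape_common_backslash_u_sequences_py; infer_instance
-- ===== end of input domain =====

-- B replaces A's 18 sequential full-string replace() passes by one left-to-right scan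
-- with a lookup table of all 18 literal key forms (alternative algorithm, same values).

-- ===== PORT A =====
def unescape_common_backslash_u_sequences_py (s : String) : String :=
  if PySem.Str.isIn "\\u" s = false then s
  else
    ((PySem.Dict.ofList
        [("\\u0026", "&"), ("\\u003d", "="), ("\\u003f", "?"), ("\\u002f", "/"),
         ("\\u003a", ":"), ("\\u0025", "%"), ("\\u0023", "#"), ("\\u0020", " "),
         ("\\u0022", "\"")]).items).foldl
      (fun t kv =>
        PySem.Str.replace (PySem.Str.replace t kv.1 kv.2) (PySem.Str.upper kv.1) kv.2) s

-- ===== PORT B =====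
-- the nine base pairs of Source B's literal dict
def pvBase : List (String × String) :=
  [("\\u0026", "&"), ("\\u003d", "="), ("\\u003f", "?"), ("\\u002f", "/"),
   ("\\u003a", ":"), ("\\u0025", "%"), ("\\u0023", "#"), ("\\u0020", " "),
   ("\\u0022", "\"")]

-- Source B's table-building loop: table[k] = v; table[k.upper()] = v (all keys fresh, so the
-- dict is the association list built by appending)
def pvTable : List (List Char × List Char) :=
  pvBase.foldl
    (fun t kv => t ++ [(kv.1.toList, kv.2.toList), ((PySem.Str.upper kv.1).toList, kv.2.toList)]) []

-- Source B's while loop: at a backslash look table.get(s[i:i+6]) up, else copy one char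
def pvScan (l : List Char) : List Char :=
  match l with
  | [] => []
  | c :: cs =>
    if c = '\\' then
      match (pvTable.find? (fun p => p.1 == (c :: cs).take 6)).map (fun p => p.2) with
      | some v => v ++ pvScan ((c :: cs).drop 6)
      | none => c :: pvScan cs
    else c :: pvScan cs
termination_by l.length
decreasing_by all_goals (simp; try omega)

def unescape_common_backslash_u_sequences_py_alt (s : String) : String :=
  if PySem.Str.isIn "\\u" s = false then s
  else String.ofList (pvScan s.toList)

-- ===== PRECONDITION & SPEC =====
def Spec_unescape_common_backslash_u_sequences_py (s : String) (out : String) : Prop := out = unescape_common_backslash_u_sequences_py_alt s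
instance (s : String) (out : String) : Decidable (Spec_unescape_common_backslash_u_sequences_py s out) := by unfold Spec_unescape_common_backslash_u_sequences_py; infer_instance

-- ===== CLAIM (what is proved, stated in full; the proofs are below) =====
def Claim_equal_unescape_common_backslash_u_sequences_py : Prop := ∀ (s : String), Dom_unescape_common_backslash_u_sequences_py s → Spec_unescape_common_backslash_u_sequences_py s (unescape_common_backslash_u_sequences_py s)

-- ===== LEMMAS AND PROOFS =====

-- a fuel-indexed, accumulator-free restatement of PySem.Chars.replace.go
def pvRepl (old new : List Char) : Nat → List Char → List Char
  | 0, l => l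
  | _ + 1, [] => []
  | fuel + 1, c :: t =>
    if old.isPrefixOf (c :: t) then new ++ pvRepl old new fuel (List.drop old.length (c :: t))
    else c :: pvRepl old new fuel t

theorem pvGo_eq (old new : List Char) : ∀ (fuel : Nat) (l acc : List Char),
    PySem.Chars.replace.go old new fuel l acc = acc.reverse ++ pvRepl old new fuel l := by
  intro fuel
  induction fuel with
  | zero => intro l acc; simp [PySem.Chars.replace.go, pvRepl]
  | succ n ih =>
    intro l acc
    cases l with
    | nil => simp [PySem.Chars.replace.go, pvRepl]
    | cons c t =>
      rw [PySem.Chars.replace.go]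
      by_cases h : old.isPrefixOf (c :: t)
      · simp [h, ih, pvRepl]
      · simp [h, ih, pvRepl]

theorem pvRepl_fuel (old new : List Char) (hne : old ≠ []) : ∀ (f f' : Nat) (l : List Char),
    l.length ≤ f → l.length ≤ f' → pvRepl old new f l = pvRepl old new f' l := by
  have hol : 1 ≤ old.length := by
    cases old with
    | nil => exact absurd rfl hne
    | cons _ _ => simp
  intro f
  induction f with
  | zero =>
    intro f' l h _
    interval_cases hl : l.length
    · rw [List.length_eq_zero_iff] at hl; subst hl
      cases f' <;> simp [pvRepl]
  | succ n ih =>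
    intro f' l h1 h2
    cases l with
    | nil => cases f' <;> simp [pvRepl]
    | cons c t =>
      cases f' with
      | zero => simp at h2
      | succ m =>
        have h1' : t.length ≤ n := by simp at h1; omega
        have h2' : t.length ≤ m := by simp at h2; omega
        simp only [pvRepl]
        by_cases hp : old.isPrefixOf (c :: t)
        · rw [if_pos hp, if_pos hp]
          have hd1 : (List.drop old.length (c :: t)).length ≤ n := by
            simp [List.length_drop]; omega
          have hd2 : (List.drop old.length (c :: t)).length ≤ m := by
            simp [List.length_drop]; omega
          rw [ih m _ hd1 hd2]
        · rw [if_neg hp, if_neg hp, ih m t h1' h2']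

theorem pvReplace_eq (old new l : List Char) (h : old ≠ []) :
    PySem.Chars.replace l old new = pvRepl old new l.length l := by
  rw [PySem.Chars.replace]
  simp [List.isEmpty_iff, h, pvGo_eq]

theorem pvReplace_nil (old new : List Char) (h : old ≠ []) :
    PySem.Chars.replace [] old new = [] := by
  rw [pvReplace_eq _ _ _ h]; simp [pvRepl]

theorem pvReplace_cons_neg (old new : List Char) (c : Char) (t : List Char)
    (hne : old ≠ []) (h : ¬ old <+: (c :: t)) :
    PySem.Chars.replace (c :: t) old new = c :: PySem.Chars.replace t old new := by
  rw [pvReplace_eq _ _ _ hne, pvReplace_eq _ _ _ hne]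
  have : ¬ old.isPrefixOf (c :: t) := by
    rw [List.isPrefixOf_iff_prefix]; exact h
  simp only [List.length_cons, pvRepl]
  rw [if_neg this]

theorem pvReplace_pos (old new l : List Char) (hne : old ≠ []) (hp : old <+: l) :
    PySem.Chars.replace l old new = new ++ PySem.Chars.replace (l.drop old.length) old new := by
  cases l with
  | nil =>
    have : old = [] := List.prefix_nil.mp hp
    exact absurd this hne
  | cons c t =>
    rw [pvReplace_eq _ _ _ hne, pvReplace_eq _ _ _ hne]
    have hpb : old.isPrefixOf (c :: t) := List.isPrefixOf_iff_prefix.mpr hp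
    simp only [List.length_cons, pvRepl]
    rw [if_pos hpb]
    congr 1
    apply pvRepl_fuel _ _ hne
    · have hol : 1 ≤ old.length := by
        cases old with
        | nil => exact absurd rfl hne
        | cons _ _ => simp
      simp [List.length_drop]; omega
    · simp [List.length_drop]

-- if none of the first n output characters is a replacement character, the first n
-- characters were copied unchanged
theorem pvTake_replace (old new : List Char) (hne : old ≠ []) (hnew : new ≠ []) :
    ∀ (m : Nat) (cs : List Char), cs.length ≤ m → ∀ (n : Nat),
      (∀ ch ∈ new, ch ∉ (PySem.Chars.replace cs old new).take n) →
      (PySem.Chars.replace cs old new).take n = cs.take n := by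
  intro m
  induction m with
  | zero =>
    intro cs h n _
    have : cs = [] := List.length_eq_zero_iff.mp (by omega)
    subst this
    rw [pvReplace_nil _ _ hne]
  | succ k ih =>
    intro cs hlen n hch
    cases cs with
    | nil => rw [pvReplace_nil _ _ hne]
    | cons c t =>
      by_cases hp : old <+: (c :: t)
      · rw [pvReplace_pos _ _ _ hne hp] at hch ⊢
        cases n with
        | zero => simp
        | succ n' =>
          exfalso
          cases hn : new with
          | nil => exact hnew hn
          | cons ch0 nt =>
            apply hch ch0 (by simp [hn])
            simp [hn]
      · rw [pvReplace_cons_neg _ _ _ _ hne hp] at hch ⊢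
        cases n with
        | zero => simp
        | succ n' =>
          simp only [List.take_succ_cons]
          congr 1
          apply ih t (by simp at hlen; omega)
          intro ch hm hmem
          exact hch ch hm (by simp [hmem])

-- the chain of replace passes over a pair list
def pvChain (u : List (List Char × List Char)) (l : List Char) : List Char :=
  u.foldl (fun acc p => PySem.Chars.replace acc p.1 p.2) l

-- table facts, by computation (stated on Bool and lifted)
def pvVC : List Char := "&=?/:%# \"".toList

set_option maxRecDepth 4096 in
theorem pvTableFactsB : (pvTable.all (fun p =>
    p.1.length == 6 && p.1.getD 0 ' ' == '\\' && p.2.length == 1 &&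
    p.1.getD 1 ' ' != '\\' && p.1.getD 2 ' ' != '\\' && p.1.getD 3 ' ' != '\\' &&
    p.1.getD 4 ' ' != '\\' && p.1.getD 5 ' ' != '\\' &&
    p.2.all (fun ch => pvVC.contains ch) && p.1.all (fun ch => !pvVC.contains ch))) = true := by
  decide

theorem pvTable_shape : ∀ p ∈ pvTable, p.1.length = 6 ∧ p.1.getD 0 ' ' = '\\' ∧ p.2.length = 1 := by
  intro p hp
  have h := List.all_eq_true.mp pvTableFactsB p hp
  simp only [Bool.and_eq_true, beq_iff_eq, bne_iff_ne, List.all_eq_true] at h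
  tauto

theorem pvTable_tail_no_bs : ∀ p ∈ pvTable, ∀ i, i < 6 → 1 ≤ i → p.1.getD i ' ' ≠ '\\' := by
  intro p hp i hi hipos
  have h := List.all_eq_true.mp pvTableFactsB p hp
  simp only [Bool.and_eq_true, beq_iff_eq, bne_iff_ne, List.all_eq_true] at h
  interval_cases i <;> tauto

theorem pvTable_val_fresh : ∀ p ∈ pvTable, ∀ q ∈ pvTable, ∀ ch ∈ p.2, ch ∉ q.1 := by
  intro p hp q hq ch hch hmem
  have h1 := List.all_eq_true.mp pvTableFactsB p hp
  have h2 := List.all_eq_true.mp pvTableFactsB q hq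
  simp only [Bool.and_eq_true, beq_iff_eq, bne_iff_ne, List.all_eq_true] at h1 h2
  have hin : pvVC.contains ch = true := h1.1.2 ch hch
  have hout := h2.2 ch hmem
  simp only [Bool.not_eq_true'] at hout
  rw [hin] at hout
  simp at hout

def pvNoKey (l : List Char) : Prop := ∀ p ∈ pvTable, ¬ p.1 <+: l

theorem pvKey_ne_nil {p : List Char × List Char} (hp : p ∈ pvTable) : p.1 ≠ [] := by
  have := (pvTable_shape p hp).1
  intro h; rw [h] at this; simp at this

theorem pvKey_head {p : List Char × List Char} (hp : p ∈ pvTable) :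
    ∃ tl, p.1 = '\\' :: tl ∧ tl.length = 5 := by
  obtain ⟨h6, h1, _⟩ := pvTable_shape p hp
  cases hk : p.1 with
  | nil => rw [hk] at h6; simp at h6
  | cons hd tl =>
    rw [hk] at h1 h6
    simp [List.getD] at h1
    simp at h6
    exact ⟨tl, by rw [h1], h6⟩

theorem pvChain_nil : ∀ (u : List (List Char × List Char)), (∀ p ∈ u, p ∈ pvTable) →
    pvChain u [] = [] := by
  intro u
  induction u with
  | nil => intro _; rfl
  | cons q u' ih =>
    intro h
    have hq := h q (by simp)
    show pvChain u' (PySem.Chars.replace [] q.1 q.2) = []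
    rw [pvReplace_nil _ _ (pvKey_ne_nil hq)]
    exact ih (fun p hp => h p (by simp [hp]))

theorem pvNoKey_replace (c : Char) (cs : List Char) (h : pvNoKey (c :: cs))
    (q : List Char × List Char) (hq : q ∈ pvTable) :
    pvNoKey (c :: PySem.Chars.replace cs q.1 q.2) := by
  intro p hp hpre
  obtain ⟨tl, hpk, htl⟩ := pvKey_head hp
  rw [hpk] at hpre
  rw [List.cons_prefix_cons] at hpre
  obtain ⟨hc, htlpre⟩ := hpre
  set r := PySem.Chars.replace cs q.1 q.2 with hr
  have htake : r.take 5 = tl := by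
    have h := List.prefix_iff_eq_take.mp htlpre
    rw [htl] at h
    exact h.symm
  have hvtl : ∀ ch ∈ q.2, ch ∉ r.take 5 := by
    intro ch hch hmem
    rw [htake] at hmem
    exact pvTable_val_fresh q hq p hp ch hch (by rw [hpk]; simp [hmem])
  have hq2 : q.2 ≠ [] := by
    have := (pvTable_shape q hq).2.2
    intro h; rw [h] at this; simp at this
  have hcs : r.take 5 = cs.take 5 :=
    pvTake_replace q.1 q.2 (pvKey_ne_nil hq) hq2 cs.length cs (le_refl _) 5 hvtl
  apply h p hp
  rw [hpk, ← hc]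
  rw [List.cons_prefix_cons]
  refine ⟨rfl, ?_⟩
  rw [List.prefix_iff_eq_take, htl, ← hcs, htake]

theorem pvChain_cons_nokey : ∀ (u : List (List Char × List Char)), (∀ p ∈ u, p ∈ pvTable) →
    ∀ (c : Char) (cs : List Char), pvNoKey (c :: cs) →
    pvChain u (c :: cs) = c :: pvChain u cs := by
  intro u
  induction u with
  | nil => intro _ c cs _; rfl
  | cons q u' ih =>
    intro h c cs hnk
    have hq := h q (by simp)
    show pvChain u' (PySem.Chars.replace (c :: cs) q.1 q.2) = c :: pvChain u' (PySem.Chars.replace cs q.1 q.2)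
    rw [pvReplace_cons_neg _ _ _ _ (pvKey_ne_nil hq) (hnk q hq)]
    exact ih (fun p hp => h p (by simp [hp])) c _ (pvNoKey_replace c cs hnk q hq)

theorem pvChain_cons_nonbs : ∀ (u : List (List Char × List Char)), (∀ p ∈ u, p ∈ pvTable) →
    ∀ (c : Char), c ≠ '\\' → ∀ (X : List Char),
    pvChain u (c :: X) = c :: pvChain u X := by
  intro u
  induction u with
  | nil => intro _ c _ X; rfl
  | cons q u' ih =>
    intro h c hc X
    have hq := h q (by simp)
    obtain ⟨tl, hpk, _⟩ := pvKey_head hq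
    show pvChain u' (PySem.Chars.replace (c :: X) q.1 q.2) = c :: pvChain u' (PySem.Chars.replace X q.1 q.2)
    rw [pvReplace_cons_neg _ _ _ _ (pvKey_ne_nil hq) (by
      rw [hpk, List.cons_prefix_cons]
      rintro ⟨h1, -⟩; exact hc h1.symm)]
    exact ih (fun p hp => h p (by simp [hp])) c hc _

theorem pvReplace_skip (old new : List Char) (hne : old ≠ []) :
    ∀ (pre t : List Char), (∀ i < pre.length, ¬ old <+: (pre.drop i ++ t)) →
    PySem.Chars.replace (pre ++ t) old new = pre ++ PySem.Chars.replace t old new := by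
  intro pre
  induction pre with
  | nil => intro t _; simp
  | cons c pre' ih =>
    intro t h
    rw [List.cons_append, pvReplace_cons_neg _ _ _ _ hne (by
      have := h 0 (by simp)
      simpa using this)]
    rw [ih t (fun i hi => by
      have := h (i + 1) (by simp; omega)
      simpa using this)]
    rfl

theorem pvReplace_append_key (p q : List Char × List Char)
    (hp : p ∈ pvTable) (hq : q ∈ pvTable) (hne : q.1 ≠ p.1) (t : List Char) :
    PySem.Chars.replace (p.1 ++ t) q.1 q.2 = p.1 ++ PySem.Chars.replace t q.1 q.2 := by
  apply pvReplace_skip _ _ (pvKey_ne_nil hq)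
  intro i hi hpre
  have hp6 := (pvTable_shape p hp).1
  have hq6 := (pvTable_shape q hq).1
  rcases Nat.eq_zero_or_pos i with hi0 | hipos
  · subst hi0
    simp only [List.drop_zero] at hpre
    have : q.1 = (p.1 ++ t).take q.1.length := List.prefix_iff_eq_take.mp hpre
    rw [hq6, ← hp6, List.take_left] at this
    exact hne this
  · rw [hp6] at hi
    have hdrop : p.1.drop i = p.1[i] :: p.1.drop (i + 1) :=
      List.drop_eq_getElem_cons (by omega)
    rw [hdrop] at hpre
    obtain ⟨tl, hqk, _⟩ := pvKey_head hq
    rw [hqk, List.cons_append, List.cons_prefix_cons] at hpre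
    have hbs : p.1[i] ≠ '\\' := by
      have := pvTable_tail_no_bs p hp i hi hipos
      rwa [List.getD_eq_getElem _ _ (by omega)] at this
    exact hbs hpre.1.symm

theorem pvChain_append_key : ∀ (u : List (List Char × List Char)), (∀ p ∈ u, p ∈ pvTable) →
    ∀ (k : List Char × List Char), k ∈ pvTable → (∀ p ∈ u, p.1 ≠ k.1) →
    ∀ (t : List Char), pvChain u (k.1 ++ t) = k.1 ++ pvChain u t := by
  intro u
  induction u with
  | nil => intro _ k _ _ t; rfl
  | cons q u' ih =>
    intro h k hk hne t
    have hq := h q (by simp)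
    show pvChain u' (PySem.Chars.replace (k.1 ++ t) q.1 q.2) = k.1 ++ pvChain u' (PySem.Chars.replace t q.1 q.2)
    rw [pvReplace_append_key k q hk hq (hne q (by simp)) t]
    exact ih (fun p hp => h p (by simp [hp])) k hk (fun p hp => hne p (by simp [hp])) _

theorem pvChain_split (u w : List (List Char × List Char)) (q : List Char × List Char)
    (l : List Char) :
    pvChain (u ++ q :: w) l = pvChain w (PySem.Chars.replace (pvChain u l) q.1 q.2) := by
  simp [pvChain, List.foldl_append]

-- the main invariant: the 18-pass chain computes exactly what the single scan computes
theorem pvChain_eq_scan : ∀ (m : Nat) (l : List Char), l.length ≤ m →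
    pvChain pvTable l = pvScan l := by
  intro m
  induction m with
  | zero =>
    intro l h
    have : l = [] := List.length_eq_zero_iff.mp (by omega)
    subst this
    rw [pvChain_nil pvTable (fun p hp => hp), pvScan]
  | succ n ih =>
    intro l hlen
    cases l with
    | nil =>
      rw [pvChain_nil pvTable (fun p hp => hp), pvScan]
    | cons c cs =>
      by_cases hc : c = '\\'
      · subst hc
        cases hfind : pvTable.find? (fun p => p.1 == ('\\' :: cs).take 6) with
        | none =>
          have hnk : pvNoKey ('\\' :: cs) := by
            intro p hp hpre
            have h6 := (pvTable_shape p hp).1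
            have hpeq : p.1 = ('\\' :: cs).take p.1.length := List.prefix_iff_eq_take.mp hpre
            rw [h6] at hpeq
            have hfn := List.find?_eq_none.mp hfind p hp
            simp only [beq_iff_eq] at hfn
            exact hfn hpeq
          rw [pvChain_cons_nokey pvTable (fun p hp => hp) _ _ hnk]
          rw [ih cs (by simp at hlen; omega)]
          rw [pvScan, if_pos rfl, hfind]
          rfl
        | some q =>
          rw [List.find?_eq_some_iff_append] at hfind
          obtain ⟨hbeq, as, bs, hsplit, has⟩ := hfind
          have hq : q ∈ pvTable := by rw [hsplit]; simp
          have hq6 := (pvTable_shape q hq).1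
          have hkey : q.1 = ('\\' :: cs).take 6 := by simpa using hbeq
          have hlen6 : 6 ≤ ('\\' :: cs).length := by
            by_contra hcon
            push Not at hcon
            have : (('\\' :: cs).take 6).length = ('\\' :: cs).length := by
              rw [List.length_take]; omega
            rw [← hkey, hq6] at this; omega
          have hdec : ('\\' :: cs) = q.1 ++ ('\\' :: cs).drop 6 := by
            rw [hkey]; rw [List.take_append_drop]
          have hsub_as : ∀ p ∈ as, p ∈ pvTable := by
            intro p hp; rw [hsplit]; simp [hp]
          have hsub_bs : ∀ p ∈ bs, p ∈ pvTable := by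
            intro p hp; rw [hsplit]; simp [hp]
          have hne_as : ∀ p ∈ as, p.1 ≠ q.1 := by
            intro p hp heq
            have := has p hp
            rw [heq, hkey] at this
            simp at this
          -- left side
          conv_lhs => rw [hsplit, hdec]
          rw [pvChain_split]
          rw [pvChain_append_key as hsub_as q hq hne_as]
          rw [pvReplace_pos q.1 q.2 _ (pvKey_ne_nil hq) (List.prefix_append _ _)]
          rw [List.drop_left]
          obtain ⟨h6', _, hv1⟩ := pvTable_shape q hq
          obtain ⟨vc, hvc⟩ : ∃ vc, q.2 = [vc] := by
            cases hq2 : q.2 with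
            | nil => rw [hq2] at hv1; simp at hv1
            | cons a l2 =>
              rw [hq2] at hv1; simp at hv1
              exact ⟨a, by rw [hv1]⟩
          have hvcbs : vc ≠ '\\' := by
            intro heq
            apply pvTable_val_fresh q hq q hq vc (by simp [hvc])
            obtain ⟨tl, hqk, _⟩ := pvKey_head hq
            rw [hqk, heq]; simp
          rw [hvc, List.singleton_append]
          rw [pvChain_cons_nonbs bs hsub_bs vc hvcbs]
          -- right side
          have hrhs : pvChain pvTable (('\\' :: cs).drop 6) =
              pvChain bs (PySem.Chars.replace (pvChain as (('\\' :: cs).drop 6)) q.1 q.2) := by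
            conv_lhs => rw [hsplit]
            rw [pvChain_split]
          rw [hvc] at hrhs
          rw [← hrhs]
          rw [ih (('\\' :: cs).drop 6) (by simp [List.length_drop] at hlen ⊢; omega)]
          have hfind' : pvTable.find? (fun p => p.1 == ('\\' :: cs).take 6) = some q := by
            rw [List.find?_eq_some_iff_append]
            exact ⟨hbeq, as, bs, hsplit, has⟩
          rw [pvScan, if_pos rfl, hfind']
          simp [hvc]
      · have hnk : pvNoKey (c :: cs) := by
          intro p hp hpre
          obtain ⟨tl, hpk, _⟩ := pvKey_head hp
          rw [hpk, List.cons_prefix_cons] at hpre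
          exact hc hpre.1.symm
        rw [pvChain_cons_nokey pvTable (fun p hp => hp) _ _ hnk]
        rw [ih cs (by simp at hlen; omega)]
        rw [pvScan]
        simp [hc]

-- bridge from A's String-level fold to the char-level chain over B's table
theorem pvFold_toList : ∀ (bs : List (String × String)) (s : String),
    (bs.foldl (fun t kv =>
        PySem.Str.replace (PySem.Str.replace t kv.1 kv.2) (PySem.Str.upper kv.1) kv.2) s).toList
    = pvChain (bs.flatMap (fun kv =>
        [(kv.1.toList, kv.2.toList), ((PySem.Str.upper kv.1).toList, kv.2.toList)])) s.toList := by
  intro bs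
  induction bs with
  | nil => intro s; rfl
  | cons kv bs' ih =>
    intro s
    rw [List.foldl_cons, ih, List.flatMap_cons]
    rw [show (PySem.Str.replace (PySem.Str.replace s kv.1 kv.2) (PySem.Str.upper kv.1) kv.2).toList
        = PySem.Chars.replace (PySem.Chars.replace s.toList kv.1.toList kv.2.toList)
            (PySem.Str.upper kv.1).toList kv.2.toList from by
      rw [PySem.Str.toList_replace, PySem.Str.toList_replace]]
    rfl

theorem pvTable_eq_flatMap : pvTable = pvBase.flatMap (fun kv =>
    [(kv.1.toList, kv.2.toList), ((PySem.Str.upper kv.1).toList, kv.2.toList)]) := by decide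

-- ===== VERDICT (by name: the statement is the Claim_ definition above) =====
theorem unescape_common_backslash_u_sequences_py_spec : Claim_equal_unescape_common_backslash_u_sequences_py := by
  intro s _
  unfold Spec_unescape_common_backslash_u_sequences_py
  unfold unescape_common_backslash_u_sequences_py unescape_common_backslash_u_sequences_py_alt
  by_cases hg : PySem.Str.isIn "\\u" s = false
  · rw [if_pos hg, if_pos hg]
  · rw [if_neg hg, if_neg hg]
    have hitems : (PySem.Dict.ofList
        [("\\u0026", "&"), ("\\u003d", "="), ("\\u003f", "?"), ("\\u002f", "/"),
         ("\\u003a", ":"), ("\\u0025", "%"), ("\\u0023", "#"), ("\\u0020", " "),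
         ("\\u0022", "\"")]).items = pvBase := by decide
    rw [hitems]
    have h1 := pvFold_toList pvBase s
    rw [← pvTable_eq_flatMap] at h1
    rw [pvChain_eq_scan s.toList.length s.toList (le_refl _)] at h1
    rw [← String.ofList_toList (s := pvBase.foldl (fun t kv => PySem.Str.replace (PySem.Str.replace t kv.1 kv.2) (PySem.Str.upper kv.1) kv.2) s), h1]
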